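-- pv_equiv track=rewrite | github.com/natcnp/TestGit04 | bad/app.py | reduce_to_20_characters
-- ===== SOURCE A (Python) =====
-- def reduce_to_20_characters(original):
--     substitution_table = {
--         'aa': 'A', 'ab': 'B', 'ac': 'C', 'ad': 'D',
--         'ba': 'E', 'bb': 'F', 'bc': 'G', 'bd': 'H',
--         'ca': 'I', 'cb': 'J', 'cc': 'K', 'cd': 'L',
--         'da': 'M', 'db': 'N', 'dc': 'O', 'dd': 'P'
--     }
--     reduced = ''
--
--     for i in range(0, len(original), 2):
--         pair = original[i:i + 2]
--         if pair in substitution_table: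
--             reduced += substitution_table[pair]
--
--     return reduced
-- ===== SOURCE B (Python) =====
-- def _code(a, b):
--     base = 'abcd'
--     return chr(ord('A') + base.index(a) * 4 + base.index(b))
--
--
-- def reduce_to_20_characters(original):
--     out = []
--     it = iter(original)
--     for a in it:
--         b = next(it, None)
--         if b is None:
--             break
--         if a in 'abcd' and b in 'abcd':
--             out.append(_code(a, b))
--     return ''.join(out)
-- ===== Notes on version B (the rewrite author's own statement) =====
-- stated objective: simpler
-- what changed: Replaces the 16-entry substitution dictionary and index-range loop with an iterator consumed two characters at a time, computing each substituted code by positional arithmetic (uppercase-letter base offset plus 4*index of the first character plus index of the second) instead of a table lookup.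
import Mathlib
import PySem

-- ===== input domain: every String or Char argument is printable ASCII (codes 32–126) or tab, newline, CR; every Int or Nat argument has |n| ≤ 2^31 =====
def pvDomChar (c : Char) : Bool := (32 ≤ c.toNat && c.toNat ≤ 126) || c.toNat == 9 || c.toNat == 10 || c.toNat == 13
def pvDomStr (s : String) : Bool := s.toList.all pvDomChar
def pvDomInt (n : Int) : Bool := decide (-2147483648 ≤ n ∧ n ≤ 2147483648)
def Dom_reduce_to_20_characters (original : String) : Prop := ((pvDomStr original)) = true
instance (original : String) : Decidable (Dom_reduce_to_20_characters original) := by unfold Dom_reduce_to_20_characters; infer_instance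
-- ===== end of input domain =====

-- B replaces A's 16-entry substitution dictionary with pairwise iteration and positional
-- arithmetic (simpler: no lookup table); equivalence of return values is proved below.


-- ===== PORT A =====
-- A's dict literal (values are the one-character strings, as lists of chars)
def pvTable : PySem.Dict (List Char) (List Char) := PySem.Dict.mk
  [(['a','a'], ['A']), (['a','b'], ['B']), (['a','c'], ['C']), (['a','d'], ['D']),
   (['b','a'], ['E']), (['b','b'], ['F']), (['b','c'], ['G']), (['b','d'], ['H']),
   (['c','a'], ['I']), (['c','b'], ['J']), (['c','c'], ['K']), (['c','d'], ['L']),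
   (['d','a'], ['M']), (['d','b'], ['N']), (['d','c'], ['O']), (['d','d'], ['P'])]

-- the loop body: pair = original[i:i+2]; if pair in table: reduced += table[pair]
def pvStepA (cs : List Char) (reduced : List Char) (i : Int) : List Char :=
  match pvTable.get? (PySem.List.slice cs (some i) (some (i + 2))) with
  | some v => reduced ++ v
  | none => reduced

def reduce_to_20_characters (original : String) : String :=
  String.ofList
    ((PySem.List.pyRange 0 (PySem.Str.len original) 2).foldl (pvStepA original.toList) [])

-- ===== PORT B =====
def pvIsBase (c : Char) : Bool := ['a','b','c','d'].contains c   -- a in 'abcd'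

def pvCode (a b : Char) : Char :=                               -- chr(ord('A') + idx(a)*4 + idx(b))
  Char.ofNat (65 + ((PySem.List.index? ['a','b','c','d'] a).getD 0) * 4
                 + (PySem.List.index? ['a','b','c','d'] b).getD 0)

-- the iterator loop of Source B: consume two characters per round, append the code or nothing
def pvAltGo : List Char → List Char
  | a :: b :: rest => (if pvIsBase a && pvIsBase b then [pvCode a b] else []) ++ pvAltGo rest
  | _ => []

def reduce_to_20_characters_alt (original : String) : String :=
  String.ofList (pvAltGo original.toList)

-- ===== PRECONDITION & SPEC =====
def Spec_reduce_to_20_characters (original : String) (out : String) : Prop := out = reduce_to_20_characters_alt original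
instance (original : String) (out : String) : Decidable (Spec_reduce_to_20_characters original out) := by unfold Spec_reduce_to_20_characters; infer_instance

-- ===== CLAIM (what is proved, stated in full; the proofs are below) =====
def Claim_equal_reduce_to_20_characters : Prop := ∀ (original : String), Dom_reduce_to_20_characters original → Spec_reduce_to_20_characters original (reduce_to_20_characters original)

-- ===== LEMMAS AND PROOFS =====

-- the A-side loop body restated over a Nat index k (i = 2*k), slices turned into drop/take
def pvStepN (cs : List Char) (reduced : List Char) (k : Nat) : List Char :=
  match pvTable.get? ((cs.drop (2 * k)).take 2) with
  | some v => reduced ++ v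
  | none => reduced

lemma pvTable_get_short (p : List Char) (hp : p.length ≠ 2) : pvTable.get? p = none := by
  rw [PySem.Dict.get?_eq_none_iff_not_mem_keys]
  intro hmem
  fin_cases hmem <;> simp_all

lemma pvTable_get_pair (a b : Char) :
    pvTable.get? [a, b] = if pvIsBase a && pvIsBase b then some [pvCode a b] else none := by
  by_cases h : pvIsBase a && pvIsBase b
  · have ha : a = 'a' ∨ a = 'b' ∨ a = 'c' ∨ a = 'd' := by
      simp [pvIsBase] at h; tauto
    have hb : b = 'a' ∨ b = 'b' ∨ b = 'c' ∨ b = 'd' := by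
      simp [pvIsBase] at h; tauto
    rw [if_pos h]
    rcases ha with rfl | rfl | rfl | rfl <;> rcases hb with rfl | rfl | rfl | rfl <;> decide
  · rw [if_neg h, PySem.Dict.get?_eq_none_iff_not_mem_keys]
    intro hmem
    fin_cases hmem <;> simp_all [pvIsBase]

lemma pvStepA_eq_stepN (cs : List Char) (reduced : List Char) (k : Nat) :
    pvStepA cs reduced (2 * (k : Int)) = pvStepN cs reduced k := by
  have hslice : PySem.List.slice cs (some (2 * (k : Int))) (some (2 * (k : Int) + 2))
      = (cs.drop (2 * k)).take 2 := by
    rw [PySem.List.slice_toNat cs (by positivity) (by positivity)]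
    congr 1
    omega
  simp [pvStepA, pvStepN, hslice]

lemma pvRangeFold (cs : List Char) : ∀ acc,
    (List.range ((cs.length + 1) / 2)).foldl (pvStepN cs) acc = acc ++ pvAltGo cs := by
  induction cs using pvAltGo.induct with
  | case1 a b rest ih =>
    intro acc
    have hlen : ((a :: b :: rest).length + 1) / 2 = (rest.length + 1) / 2 + 1 := by
      simp; omega
    rw [hlen, List.range_succ_eq_map, List.foldl_cons, List.foldl_map]
    have hstep0 : pvStepN (a :: b :: rest) acc 0
        = acc ++ (if pvIsBase a && pvIsBase b then [pvCode a b] else []) := by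
      simp only [pvStepN, Nat.mul_zero, List.drop_zero]
      rw [show (a :: b :: rest).take 2 = [a, b] by simp, pvTable_get_pair]
      split_ifs <;> simp
    have hshift : ∀ r j, pvStepN (a :: b :: rest) r (j + 1) = pvStepN rest r j := by
      intro r j
      simp only [pvStepN]
      rw [show 2 * (j + 1) = 2 * j + 2 by ring, show (a :: b :: rest).drop (2 * j + 2) = rest.drop (2 * j) by simp [List.drop_succ_cons]]
    calc (List.range ((rest.length + 1) / 2)).foldl
            (fun r j => pvStepN (a :: b :: rest) r (j + 1)) (pvStepN (a :: b :: rest) acc 0)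
        = (List.range ((rest.length + 1) / 2)).foldl (pvStepN rest)
            (acc ++ (if pvIsBase a && pvIsBase b then [pvCode a b] else [])) := by
          rw [hstep0,
            show (fun r j => pvStepN (a :: b :: rest) r (j + 1)) = pvStepN rest from
              funext fun r => funext fun j => hshift r j]
      _ = acc ++ pvAltGo (a :: b :: rest) := by
          rw [ih]; simp [pvAltGo, List.append_assoc]
  | case2 cs h =>
    intro acc
    rcases cs with _ | ⟨a, _ | ⟨b, rest⟩⟩
    · simp [pvAltGo]
    · have h1 : (([a] : List Char).length + 1) / 2 = 1 := by simp
      rw [h1, List.range_one, List.foldl_cons, List.foldl_nil]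
      simp [pvStepN, pvAltGo, pvTable_get_short [a] (by simp)]
    · exact absurd rfl (h a b rest)

-- ===== VERDICT (by name: the statement is the Claim_ definition above) =====
theorem reduce_to_20_characters_spec : Claim_equal_reduce_to_20_characters := by
  intro original _
  unfold Spec_reduce_to_20_characters reduce_to_20_characters reduce_to_20_characters_alt
  set cs := original.toList with hcs
  congr 1
  have hrange : PySem.List.pyRange 0 (PySem.Str.len original) 2
      = (List.range ((cs.length + 1) / 2)).map (fun (k : Nat) => 2 * (k : Int)) := by
    have hlen : PySem.Str.len original = (cs.length : Int) := by
      simp [PySem.Str.len_eq, hcs]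
    rw [PySem.List.pyRange_of_pos 0 (PySem.Str.len original) (by norm_num), hlen]
    have hcount : (if (0:Int) < (cs.length : Int)
        then (((cs.length : Int) - 0 + 2 - 1) / 2).toNat else 0) = (cs.length + 1) / 2 := by
      rcases Nat.eq_zero_or_pos cs.length with h0 | h0
      · simp [h0]
      · rw [if_pos (by exact_mod_cast h0),
          show ((cs.length : Int) - 0 + 2 - 1) = ((cs.length + 1 : Nat) : Int) by push_cast; ring,
          show (2 : Int) = ((2 : Nat) : Int) by norm_num, ← Int.natCast_div, Int.toNat_natCast]
    rw [hcount]
    simp only [zero_add]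
  rw [hrange, List.foldl_map,
    show (fun (r : List Char) (k : Nat) => pvStepA cs r (2 * (k : Int))) = pvStepN cs from
      funext fun r => funext fun k => pvStepA_eq_stepN cs r k,
    pvRangeFold]
  simp
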